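-- pv_equiv track=rewrite | github.com/FLOCK4H/AtomDucky | AtomDucky_no_ble/atoms/networking.py | unpack_body_and_headers
-- ===== SOURCE A (Python) =====
-- def unpack_body_and_headers(req_lines):
--     headers = {}
--     body = ""
--     is_body = False
--
--     for line in req_lines[1:]:
--         if line == "":
--             is_body = True
--             continue
--         if is_body:
--             body += line + "\n"
--         else:
--             key, value = line.split(": ", 1)
--             headers[key] = value
--
--     return headers, body.strip()
-- ===== SOURCE B (Python) =====
-- def unpack_body_and_headers(req_lines):
--     lines = req_lines[1:]
--     sep = lines.index("") if "" in lines else len(lines)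
--     headers = dict(line.split(": ", 1) for line in lines[:sep])
--     body = "\n".join(l for l in lines[sep + 1:] if l != "")
--     return headers, body.strip()
-- ===== Notes on version B (the rewrite author's own statement) =====
-- stated objective: simpler
-- what changed: Replaces A's single pass with a mutable is_body flag and string accumulation by locating the first blank line once with list.index and slicing: headers from dict() over the lines before it, body by joining the non-empty lines after it.
import Mathlib
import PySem

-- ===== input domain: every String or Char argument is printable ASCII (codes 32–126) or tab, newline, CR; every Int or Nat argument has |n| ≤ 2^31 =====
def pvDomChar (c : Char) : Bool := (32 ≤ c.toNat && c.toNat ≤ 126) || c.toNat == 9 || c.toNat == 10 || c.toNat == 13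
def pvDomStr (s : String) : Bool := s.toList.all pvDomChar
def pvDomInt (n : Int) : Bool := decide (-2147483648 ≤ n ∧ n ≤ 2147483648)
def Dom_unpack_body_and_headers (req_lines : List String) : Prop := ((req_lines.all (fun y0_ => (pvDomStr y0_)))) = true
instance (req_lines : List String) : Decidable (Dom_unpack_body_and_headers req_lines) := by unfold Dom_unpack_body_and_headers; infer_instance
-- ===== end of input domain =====

-- B replaces A's stateful one-pass flag machine by a slice decomposition at the first
-- blank line (headers before it, body after); objective: simpler.

-- ===== PORT A =====
-- the loop body of A: state = (headers, body chars, is_body flag);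
-- the `_ => st` fallback is where Python raises ValueError (excluded by Pre_)
def pvAStep (st : PySem.Dict String String × List Char × Bool) (line : String) :
    PySem.Dict String String × List Char × Bool :=
  if line = "" then (st.1, st.2.1, true)
  else if st.2.2 then (st.1, st.2.1 ++ line.toList ++ ['\n'], st.2.2)
  else match PySem.Str.splitMax? line ": " 1 with
    | some [k, v] => (st.1.insert k v, st.2.1, st.2.2)
    | _ => st

def unpack_body_and_headers (req_lines : List String) : (List (String × String)) × String :=
  let r := (req_lines.drop 1).foldl pvAStep (PySem.Dict.mk [], [], false)
  (r.1.items, PySem.Str.strip (String.ofList r.2.1))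

-- ===== PORT B =====
-- dict(line.split(": ", 1) for line in header_lines); the `_ => d` fallback is where
-- Python's dict constructor raises ValueError (excluded by Pre_)
def pvBHeader (d : PySem.Dict String String) (line : String) : PySem.Dict String String :=
  match PySem.Str.splitMax? line ": " 1 with
  | some [k, v] => d.insert k v
  | _ => d

def unpack_body_and_headers_alt (req_lines : List String) : (List (String × String)) × String :=
  let lines := req_lines.drop 1
  let sep := (PySem.List.index? lines "").getD lines.length
  let headers := (lines.take sep).foldl pvBHeader (PySem.Dict.mk [])
  let bodyLines := (lines.drop (sep + 1)).filter (fun l => l != "")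
  (headers.items, PySem.Str.strip (PySem.Str.join "\n" bodyLines))

-- ===== PRECONDITION & SPEC =====
-- Pre_ excludes exactly the inputs on which Python A raises ValueError: a line in the
-- header section (before the first blank line after the request line) without ": ".
def Pre_unpack_body_and_headers (req_lines : List String) : Prop :=
  ∀ l ∈ (req_lines.drop 1).takeWhile (fun l => l != ""), PySem.Str.isIn ": " l = true
instance (req_lines : List String) : Decidable (Pre_unpack_body_and_headers req_lines) := by
  unfold Pre_unpack_body_and_headers; infer_instance

def pvWitness_unpack_body_and_headers : List String :=
  ["GET / HTTP/1.1", "Host: atom", "X-K: v", "", "hello", "", "world"]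

def Spec_unpack_body_and_headers (req_lines : List String) (out : (List (String × String)) × String) : Prop := out = unpack_body_and_headers_alt req_lines
instance (req_lines : List String) (out : (List (String × String)) × String) : Decidable (Spec_unpack_body_and_headers req_lines out) := by unfold Spec_unpack_body_and_headers; infer_instance

-- ===== CLAIM (what is proved, stated in full; the proofs are below) =====
def Claim_equal_unpack_body_and_headers : Prop := ∀ (req_lines : List String), Dom_unpack_body_and_headers req_lines → Pre_unpack_body_and_headers req_lines → Spec_unpack_body_and_headers req_lines (unpack_body_and_headers req_lines)

-- ===== LEMMAS AND PROOFS =====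

-- concatenation of the body lines as A builds it
def pvBodyCat (t : List String) : List Char :=
  ((t.filter (fun l => l != "")).map (fun l => l.toList ++ ['\n'])).flatten

lemma pvBodyPhase (t : List String) (d : PySem.Dict String String) (cs : List Char) :
    t.foldl pvAStep (d, cs, true) = (d, cs ++ pvBodyCat t, true) := by
  induction t generalizing cs with
  | nil => simp [pvBodyCat]
  | cons h t ih =>
    by_cases hh : h = ""
    · subst hh
      simp [List.foldl_cons, pvAStep, ih, pvBodyCat]
    · simp [List.foldl_cons, pvAStep, hh, ih, pvBodyCat]

lemma pvAStep_header (d : PySem.Dict String String) (cs : List Char) (h : String)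
    (hh : h ≠ "") : pvAStep (d, cs, false) h = (pvBHeader d h, cs, false) := by
  simp only [pvAStep, pvBHeader, if_neg hh]
  cases PySem.Str.splitMax? h ": " 1 with
  | none => rfl
  | some l =>
    match l with
    | [] => rfl
    | [_] => rfl
    | [_, _] => rfl
    | _ :: _ :: _ :: _ => rfl

lemma pvMainPhase (lines : List String) (d : PySem.Dict String String) (cs : List Char) :
    lines.foldl pvAStep (d, cs, false) =
      match PySem.List.index? lines "" with
      | none => (lines.foldl pvBHeader d, cs, false)
      | some i => ((lines.take i).foldl pvBHeader d, cs ++ pvBodyCat (lines.drop (i + 1)), true) := by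
  induction lines generalizing d with
  | nil => simp [PySem.List.index?]
  | cons h t ih =>
    by_cases hh : h = ""
    · subst hh
      rw [PySem.List.index?_cons_self]
      simp only [List.foldl_cons, pvAStep, if_pos]
      simpa using pvBodyPhase t d cs
    · rw [PySem.List.index?_cons_of_ne t hh]
      rw [List.foldl_cons, pvAStep_header d cs h hh, ih]
      cases PySem.List.index? t "" with
      | none => simp
      | some i => simp

lemma pvRstrip_append_nl (s : List Char) :
    PySem.Chars.rstrip (s ++ ['\n']) = PySem.Chars.rstrip s := by
  have : PySem.Chars.isspace '\n' = true := by decide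
  simp [PySem.Chars.rstrip, this]

lemma pvStrip_append_nl (s : List Char) :
    PySem.Chars.strip (s ++ ['\n']) = PySem.Chars.strip s := by
  have hnl : PySem.Chars.isspace '\n' = true := by decide
  simp only [PySem.Chars.strip, PySem.Chars.lstrip, List.dropWhile_append]
  by_cases h : (List.dropWhile PySem.Chars.isspace s).isEmpty
  · rw [if_pos h]
    simp only [List.isEmpty_iff] at h
    rw [h]
    simp [List.dropWhile, hnl]
  · rw [if_neg h]
    simp only [List.isEmpty_iff] at h
    rw [pvRstrip_append_nl]

lemma pvFlat_eq (xs : List (List Char)) (hx : xs ≠ []) :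
    (xs.map (fun l => l ++ ['\n'])).flatten = List.intercalate ['\n'] xs ++ ['\n'] := by
  induction xs with
  | nil => simp at hx
  | cons x t ih =>
    cases t with
    | nil => simp [List.intercalate]
    | cons y t' =>
      rw [List.map_cons, List.flatten_cons, ih (by simp)]
      have h2 : ['\n'].intercalate (x :: y :: t') = x ++ ['\n'] ++ ['\n'].intercalate (y :: t') := by
        simp [List.intercalate, List.intersperse]
      rw [h2]
      simp [List.append_assoc]

lemma pvStrip_cat (xs : List (List Char)) :
    PySem.Chars.strip ((xs.map (fun l => l ++ ['\n'])).flatten) =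
      PySem.Chars.strip (List.intercalate ['\n'] xs) := by
  cases hx : xs with
  | nil => simp [List.intercalate]
  | cons x t => rw [← hx, pvFlat_eq xs (by simp [hx]), pvStrip_append_nl]

lemma pvBody_eq (t : List String) :
    PySem.Str.strip (String.ofList (pvBodyCat t)) =
      PySem.Str.strip (PySem.Str.join "\n" (t.filter (fun l => l != ""))) := by
  simp only [PySem.Str.strip, PySem.Str.join, PySem.Chars.join, String.toList_ofList]
  congr 1
  have h1 : ("\n" : String).toList = ['\n'] := by decide
  rw [h1]
  have := pvStrip_cat ((t.filter (fun l => l != "")).map String.toList)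
  simpa [pvBodyCat, List.map_map, Function.comp] using this

lemma pvWhole (lines : List String) :
    ((lines.foldl pvAStep (PySem.Dict.mk [], [], false)).1.items,
      PySem.Str.strip (String.ofList (lines.foldl pvAStep (PySem.Dict.mk [], [], false)).2.1)) =
    (((lines.take ((PySem.List.index? lines "").getD lines.length)).foldl pvBHeader (PySem.Dict.mk [])).items,
      PySem.Str.strip (PySem.Str.join "\n"
        ((lines.drop ((PySem.List.index? lines "").getD lines.length + 1)).filter (fun l => l != "")))) := by
  rw [pvMainPhase]
  cases hi : PySem.List.index? lines "" with
  | none =>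
    simp only [Option.getD_none, List.take_length]
    rw [List.drop_eq_nil_of_le (by omega)]
    rfl
  | some i =>
    simp only [Option.getD_some, List.nil_append]
    exact Prod.ext rfl (pvBody_eq (lines.drop (i + 1)))

-- ===== VERDICT (by name: the statement is the Claim_ definition above) =====
theorem unpack_body_and_headers_spec : Claim_equal_unpack_body_and_headers := by
  intro req_lines _ _
  unfold Spec_unpack_body_and_headers unpack_body_and_headers unpack_body_and_headers_alt
  exact pvWhole (req_lines.drop 1)
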